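-- pv_equiv track=rewrite | github.com/pendi1901/Simulator | Simple-Assembler/labelVar.py | isLabel
-- ===== SOURCE A (Python) =====
-- def isLabel(instn, labels, reg, var, opc):
-- 	if instn[0][:-1] in var or instn[0][:-1] in reg or instn[0][:-1] in opc or instn[0][:-1] in labels:
-- 		return False
-- 	for i in instn[0][:-1]:
-- 		if i.lower() not in ['0', '1', '2', '3', '4', '5', '6', '7', '8', '9', '_', 'a', 'b', 'c', 'd', 'e', 'f', 'g',
-- 							 'h', 'i', 'j', 'k', 'l', 'm', 'n', 'o', 'p', 'q', 'r', 's', 't', 'u', 'v', 'w', 'x', 'y',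
-- 							 'z']:
-- 			return False
-- 	j = 0
-- 	for i in instn[0][:-1]:
-- 		if i.isalpha():
-- 			j += 1
-- 			break
-- 	if(j == 0):
-- 		return False
-- 	return True
-- ===== SOURCE B (Python) =====
-- def isLabel(instn, labels, reg, var, opc):
--     token = instn[0][:-1]
--     if token in var or token in reg or token in opc or token in labels:
--         return False
--     # single pass: classify each char by ASCII code (0 invalid, 1 digit/_, 2 letter)
--     # and keep the running min and max category; valid iff min>=1 and max==2
--     mn, mx = 2, 0
--     for c in token:
--         o = ord(c)
--         if 65 <= o <= 90 or 97 <= o <= 122: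
--             k = 2
--         elif 48 <= o <= 57 or o == 95:
--             k = 1
--         else:
--             k = 0
--         if k < mn:
--             mn = k
--         if k > mx:
--             mx = k
--     return mn >= 1 and mx == 2
-- ===== Notes on version B (the rewrite author's own statement) =====
-- stated objective: alternative
-- what changed: A's two staged boolean scans (lowercase-then-membership in a 38-element list, then a break-counter hunting for a letter) are replaced by one pass that maps each character via ASCII-code arithmetic to a numeric category (0 invalid, 1 digit/underscore, 2 letter) and folds a running (min,max) of categories; the token is valid iff min>=1 and max==2.
import Mathlib
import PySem

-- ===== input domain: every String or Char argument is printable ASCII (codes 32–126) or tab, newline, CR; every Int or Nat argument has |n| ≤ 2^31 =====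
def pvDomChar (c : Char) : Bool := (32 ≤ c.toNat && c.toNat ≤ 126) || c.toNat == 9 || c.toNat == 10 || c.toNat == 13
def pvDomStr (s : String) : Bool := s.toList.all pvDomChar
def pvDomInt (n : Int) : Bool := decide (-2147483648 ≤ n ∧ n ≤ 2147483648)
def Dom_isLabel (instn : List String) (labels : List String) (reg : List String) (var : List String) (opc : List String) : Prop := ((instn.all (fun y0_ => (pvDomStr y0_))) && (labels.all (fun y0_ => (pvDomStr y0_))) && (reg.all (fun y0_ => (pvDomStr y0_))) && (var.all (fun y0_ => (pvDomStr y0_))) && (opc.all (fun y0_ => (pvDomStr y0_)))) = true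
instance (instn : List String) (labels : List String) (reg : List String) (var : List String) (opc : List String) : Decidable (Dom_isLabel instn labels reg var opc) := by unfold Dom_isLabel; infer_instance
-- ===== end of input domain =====

-- B replaces A's two staged character scans (lowercase-membership list, then a break-counter)
-- by one pass folding the (min,max) of a numeric ASCII-range category per character (alternative).


-- ===== PORT A =====
-- the 38-element literal list Python A compares i.lower() against
def aAllowed : List Char :=
  ['0', '1', '2', '3', '4', '5', '6', '7', '8', '9', '_', 'a', 'b', 'c', 'd', 'e', 'f', 'g',
   'h', 'i', 'j', 'k', 'l', 'm', 'n', 'o', 'p', 'q', 'r', 's', 't', 'u', 'v', 'w', 'x', 'y', 'z']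

-- first for-loop: early `return False` when i.lower() is not in the list
def aCharsOk : List Char → Bool
  | [] => true
  | c :: rest => if aAllowed.contains (PySem.Chars.lowerChar c) then aCharsOk rest else false

-- second for-loop: j starts at 0, is incremented once and `break`s at the first alpha char
def aLetterCount : List Char → Nat
  | [] => 0
  | c :: rest => if PySem.Chars.isalpha c then 1 else aLetterCount rest

def isLabel (instn : List String) (labels : List String) (reg : List String) (var : List String) (opc : List String) : Bool :=
  match instn with
  | [] => false  -- Python raises IndexError here; excluded by Pre_isLabel
  | t :: _ =>
    let tok := PySem.Str.slice t none (some (-1))   -- instn[0][:-1]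
    if var.contains tok || reg.contains tok || opc.contains tok || labels.contains tok then
      false
    else if aCharsOk tok.toList then
      (if aLetterCount tok.toList == 0 then false else true)
    else false

-- ===== PORT B =====
-- B's per-character category: 2 = ASCII letter, 1 = digit or '_', 0 = invalid
def bCls (c : Char) : Nat :=
  if (65 ≤ c.toNat ∧ c.toNat ≤ 90) ∨ (97 ≤ c.toNat ∧ c.toNat ≤ 122) then 2
  else if (48 ≤ c.toNat ∧ c.toNat ≤ 57) ∨ c.toNat = 95 then 1
  else 0

-- B's loop body: update the running (mn, mx) pair with the category of c
def bStep (p : Nat × Nat) (c : Char) : Nat × Nat :=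
  let k := bCls c
  (if k < p.1 then k else p.1, if k > p.2 then k else p.2)

def isLabel_alt (instn : List String) (labels : List String) (reg : List String) (var : List String) (opc : List String) : Bool :=
  match instn with
  | [] => false  -- Python raises IndexError here; excluded by Pre_isLabel
  | t :: _ =>
    let tok := PySem.Str.slice t none (some (-1))   -- instn[0][:-1]
    if var.contains tok || reg.contains tok || opc.contains tok || labels.contains tok then
      false
    else
      let r := tok.toList.foldl bStep (2, 0)
      decide (1 ≤ r.1) && (r.2 == 2)

-- ===== PRECONDITION & SPEC =====
-- Pre_ excludes the empty instruction list, on which Python A raises IndexError at instn[0].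
def Pre_isLabel (instn : List String) (labels : List String) (reg : List String) (var : List String) (opc : List String) : Prop := instn ≠ []
instance (instn : List String) (labels : List String) (reg : List String) (var : List String) (opc : List String) : Decidable (Pre_isLabel instn labels reg var opc) := by unfold Pre_isLabel; infer_instance
def pvWitness_isLabel : List String × List String × List String × List String × List String := (["loop:"], [], [], [], [])

def Spec_isLabel (instn : List String) (labels : List String) (reg : List String) (var : List String) (opc : List String) (out : Bool) : Prop := out = isLabel_alt instn labels reg var opc
instance (instn : List String) (labels : List String) (reg : List String) (var : List String) (opc : List String) (out : Bool) : Decidable (Spec_isLabel instn labels reg var opc out) := by unfold Spec_isLabel; infer_instance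

-- ===== CLAIM (what is proved, stated in full; the proofs are below) =====
def Claim_equal_isLabel : Prop := ∀ (instn : List String) (labels : List String) (reg : List String) (var : List String) (opc : List String), Dom_isLabel instn labels reg var opc → Pre_isLabel instn labels reg var opc → Spec_isLabel instn labels reg var opc (isLabel instn labels reg var opc)

-- ===== LEMMAS AND PROOFS =====

lemma bCls_le2 (c : Char) : bCls c ≤ 2 := by
  unfold bCls; split_ifs <;> omega

-- B's fold computes componentwise the min and the max of the categories
lemma foldl_bStep_eq (l : List Char) (mn mx : Nat) :
    l.foldl bStep (mn, mx)
      = (l.foldl (fun a c => min a (bCls c)) mn, l.foldl (fun a c => max a (bCls c)) mx) := by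
  induction l generalizing mn mx with
  | nil => rfl
  | cons c rest ih =>
    simp only [List.foldl_cons, bStep]
    have h1 : (if bCls c < mn then bCls c else mn) = min mn (bCls c) := by split_ifs <;> omega
    have h2 : (if bCls c > mx then bCls c else mx) = max mx (bCls c) := by split_ifs <;> omega
    rw [h1, h2, ih]

-- On any character of the ASCII domain, A's lower-then-membership test is "category ≥ 1"
lemma char_key1 (c : Char) (h : c.toNat < 127) :
    aAllowed.contains (PySem.Chars.lowerChar c) = decide (1 ≤ bCls c) := by
  obtain ⟨n, hlt, rfl⟩ : ∃ n, n < 127 ∧ c = Char.ofNat n :=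
    ⟨c.toNat, h, (Char.ofNat_toNat c).symm⟩
  interval_cases n <;> decide

-- and A's isalpha test is "category = 2"
lemma char_key2 (c : Char) (h : c.toNat < 127) :
    PySem.Chars.isalpha c = decide (bCls c = 2) := by
  obtain ⟨n, hlt, rfl⟩ : ∃ n, n < 127 ∧ c = Char.ofNat n :=
    ⟨c.toNat, h, (Char.ofNat_toNat c).symm⟩
  interval_cases n <;> decide

lemma aCharsOk_eq (l : List Char) (h : ∀ c ∈ l, c.toNat < 127) :
    aCharsOk l = l.all (fun c => decide (1 ≤ bCls c)) := by
  induction l with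
  | nil => rfl
  | cons c rest ih =>
    simp only [aCharsOk, List.all_cons]
    rw [char_key1 c (h c (List.mem_cons_self ..))]
    cases hp : decide (1 ≤ bCls c) <;>
      simp [ih (fun x hx => h x (List.mem_cons_of_mem _ hx))]

lemma aLetterCount_eq_zero (l : List Char) (h : ∀ c ∈ l, c.toNat < 127) :
    (aLetterCount l == 0) = !(l.any (fun c => decide (bCls c = 2))) := by
  induction l with
  | nil => rfl
  | cons c rest ih =>
    simp only [aLetterCount, List.any_cons]
    rw [char_key2 c (h c (List.mem_cons_self ..))]
    by_cases hc : bCls c = 2 <;>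
      simp [hc, ih (fun x hx => h x (List.mem_cons_of_mem _ hx))]

lemma foldl_min_ge1 (l : List Char) (mn : Nat) :
    1 ≤ l.foldl (fun a c => min a (bCls c)) mn ↔ 1 ≤ mn ∧ ∀ c ∈ l, 1 ≤ bCls c := by
  induction l generalizing mn with
  | nil => simp
  | cons c rest ih =>
    rw [List.foldl_cons, ih]
    simp only [List.mem_cons]
    constructor
    · rintro ⟨h1, h2⟩
      refine ⟨by omega, ?_⟩
      rintro x (rfl | hx)
      · omega
      · exact h2 x hx
    · rintro ⟨h1, h2⟩
      have hc := h2 c (Or.inl rfl)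
      exact ⟨by omega, fun x hx => h2 x (Or.inr hx)⟩

lemma foldl_max_eq2 (l : List Char) (mx : Nat) (h : mx ≤ 2) :
    l.foldl (fun a c => max a (bCls c)) mx = 2 ↔ mx = 2 ∨ ∃ c ∈ l, bCls c = 2 := by
  induction l generalizing mx with
  | nil => simp
  | cons c rest ih =>
    rw [List.foldl_cons, ih (max mx (bCls c)) (by have := bCls_le2 c; omega)]
    simp only [List.mem_cons]
    constructor
    · rintro (h1 | ⟨x, hx, h2⟩)
      · have hc := bCls_le2 c
        have h2 : mx = 2 ∨ bCls c = 2 := by omega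
        exact h2.elim Or.inl (fun e => Or.inr ⟨c, Or.inl rfl, e⟩)
      · exact Or.inr ⟨x, Or.inr hx, h2⟩
    · rintro (h1 | ⟨x, hx, h2⟩)
      · exact Or.inl (by have hc := bCls_le2 c; omega)
      · rcases hx with rfl | hx
        · exact Or.inl (by have hc := bCls_le2 x; omega)
        · exact Or.inr ⟨x, hx, h2⟩

-- A's two loop results combined equal B's min/max reduction
lemma loops_eq (l : List Char) (h : ∀ c ∈ l, c.toNat < 127) :
    (if aCharsOk l then (if aLetterCount l == 0 then false else true) else false)
      = (decide (1 ≤ (l.foldl bStep (2, 0)).1) && ((l.foldl bStep (2, 0)).2 == 2)) := by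
  rw [foldl_bStep_eq, aCharsOk_eq _ h, aLetterCount_eq_zero _ h]
  by_cases hall : ∀ c ∈ l, 1 ≤ bCls c
  · have e1 : l.all (fun c => decide (1 ≤ bCls c)) = true :=
      List.all_eq_true.mpr (fun c hc => decide_eq_true (hall c hc))
    have f1 : decide (1 ≤ l.foldl (fun a c => min a (bCls c)) 2) = true :=
      decide_eq_true ((foldl_min_ge1 l 2).mpr ⟨by omega, hall⟩)
    by_cases hany : ∃ c ∈ l, bCls c = 2
    · have e2 : l.any (fun c => decide (bCls c = 2)) = true := by
        obtain ⟨x, hx, h2⟩ := hany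
        exact List.any_eq_true.mpr ⟨x, hx, decide_eq_true h2⟩
      have f2 : (l.foldl (fun a c => max a (bCls c)) 0 == 2) = true :=
        beq_iff_eq.mpr ((foldl_max_eq2 l 0 (by omega)).mpr (Or.inr hany))
      simp [e1, e2, f1, f2]
    · have e2 : l.any (fun c => decide (bCls c = 2)) = false := by
        rw [Bool.eq_false_iff]
        intro hx
        exact hany (by simpa using List.any_eq_true.mp hx)
      have f2 : (l.foldl (fun a c => max a (bCls c)) 0 == 2) = false := by
        rw [Bool.eq_false_iff]
        intro hx
        rcases (foldl_max_eq2 l 0 (by omega)).mp (beq_iff_eq.mp hx) with h0 | h0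
        · omega
        · exact hany h0
      simp [e1, e2, f2]
  · have e1 : l.all (fun c => decide (1 ≤ bCls c)) = false := by
      rw [Bool.eq_false_iff]
      intro hx
      exact hall (fun c hc => by simpa using List.all_eq_true.mp hx c hc)
    have f1 : decide (1 ≤ l.foldl (fun a c => min a (bCls c)) 2) = false :=
      decide_eq_false (fun hp => hall ((foldl_min_ge1 l 2).mp hp).2)
    simp [e1, f1]

-- ===== VERDICT (by name: the statement is the Claim_ definition above) =====
theorem isLabel_spec : Claim_equal_isLabel := by
  intro instn labels reg var opc hDom hPre
  unfold Spec_isLabel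
  match instn with
  | [] => exact absurd rfl hPre
  | t :: rest =>
    unfold isLabel isLabel_alt
    simp only []
    have ht : pvDomStr t = true := by
      simp only [Dom_isLabel, Bool.and_eq_true, List.all_cons] at hDom
      exact hDom.1.1.1.1.1
    have hchars : ∀ c ∈ (PySem.Str.slice t none (some (-1))).toList, c.toNat < 127 := by
      intro c hc
      have hsub : c ∈ t.toList := by
        rw [PySem.Str.slice_to_neg_one] at hc
        exact List.dropLast_subset _ hc
      have := (List.all_eq_true.mp ht) c hsub
      simp only [pvDomChar, Bool.or_eq_true, Bool.and_eq_true, decide_eq_true_eq, beq_iff_eq] at this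
      omega
    split
    · rfl
    · exact loops_eq _ hchars
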